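-- pv_equiv track=rewrite | github.com/quitedob/deep-research | src/export/pptx.py | _parse_content_to_slides
-- ===== SOURCE A (Python) =====
-- from typing import Dict, Any, List, Optional
--
-- def _parse_content_to_slides(content: str, title: str) -> List[Dict[str, Any]]:
--     lines = [ln.rstrip() for ln in content.splitlines()]
--     slides: List[Dict[str, Any]] = []
--
--     current_title = title or "演示文稿"
--     current_body: List[str] = []
--
--     for ln in lines:
--         if ln.startswith("#"):
--             if current_body:
--                 slides.append({
--                     "type": "content",
--                     "title": current_title,
--                     "content": "\n".join(current_body).strip(),
--                 })
--                 current_body = []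
--             current_title = ln.lstrip("#").strip() or current_title
--         else:
--             current_body.append(ln)
--
--     if current_body:
--         slides.append({
--             "type": "content",
--             "title": current_title,
--             "content": "\n".join(current_body).strip(),
--         })
--
--     if not slides:
--         slides.append({"type": "content", "title": title or "演示文稿", "content": ""})
--     return slides
-- ===== SOURCE B (Python) =====
-- from typing import Dict, Any, List
--
-- def _parse_content_to_slides(content: str, title: str) -> List[Dict[str, Any]]:
--     # Two-phase: first scan maximal runs of heading/non-heading lines with two
--     # pointers, then emit one slide per non-heading run.
--     lines = [ln.rstrip() for ln in content.splitlines()]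
--     slides: List[Dict[str, Any]] = []
--     current_title = title or "演示文稿"
--     i, n = 0, len(lines)
--     while i < n:
--         is_head = lines[i].startswith("#")
--         j = i + 1
--         while j < n and lines[j].startswith("#") == is_head:
--             j += 1
--         run = lines[i:j]
--         if is_head:
--             for ln in run:
--                 current_title = ln.lstrip("#").strip() or current_title
--         else:
--             slides.append({
--                 "type": "content",
--                 "title": current_title,
--                 "content": "\n".join(run).strip(),
--             })
--         i = j
--     if not slides:
--         slides.append({"type": "content", "title": title or "演示文稿", "content": ""})
--     return slides
-- ===== Notes on version B (the rewrite author's own statement) =====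
-- stated objective: alternative
-- what changed: B replaces A's streaming accumulator (current_body flushed on each heading and at EOF) by a two-phase run scan: two pointers cut the lines into maximal heading/non-heading runs, heading runs fold the title cascade and each non-heading run emits exactly one slide.
import Mathlib
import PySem

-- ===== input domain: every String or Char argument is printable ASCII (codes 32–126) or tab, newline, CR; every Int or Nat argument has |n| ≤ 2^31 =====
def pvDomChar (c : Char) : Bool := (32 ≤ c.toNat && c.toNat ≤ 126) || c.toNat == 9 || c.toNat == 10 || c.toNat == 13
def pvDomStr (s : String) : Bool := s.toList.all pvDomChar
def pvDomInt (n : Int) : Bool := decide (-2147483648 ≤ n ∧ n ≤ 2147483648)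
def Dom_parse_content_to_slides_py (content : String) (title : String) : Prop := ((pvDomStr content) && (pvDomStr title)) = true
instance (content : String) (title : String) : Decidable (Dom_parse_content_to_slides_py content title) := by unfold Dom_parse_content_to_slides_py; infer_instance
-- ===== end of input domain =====

-- B replaces A's streaming body-accumulator by a two-phase scan over maximal heading/non-heading
-- runs (two pointers); same O(n) cost, proved to return the same slide list.

-- shared literal pieces (both Pythons contain these expressions verbatim)
def pvIsHead (ln : String) : Bool := PySem.Str.startswith ln "#"
-- hand port of ln.lstrip("#") (PySem has no lstrip-with-chars): drop leading '#' chars; exact here since the chars argument is the single char '#'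
def pvLstripHash (ln : String) : String := String.ofList (ln.toList.dropWhile (fun c => c == '#'))
def pvTitleStep (ct : String) (ln : String) : String :=
  let t := PySem.Str.strip (pvLstripHash ln)
  if t = "" then ct else t
def pvMkSlide (ct : String) (body : List String) : List (String × String) :=
  [("type", "content"), ("title", ct), ("content", PySem.Str.strip (PySem.Str.join "\n" body))]
def pvDefaultSlide (title : String) : List (String × String) :=
  [("type", "content"), ("title", if title = "" then "演示文稿" else title), ("content", "")]

-- ===== PORT A =====
def pvStepA (st : List (List (String × String)) × String × List String) (ln : String) :
    List (List (String × String)) × String × List String :=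
  let (slides, ct, body) := st
  if pvIsHead ln then
    ((if body ≠ [] then slides ++ [pvMkSlide ct body] else slides), pvTitleStep ct ln, [])
  else
    (slides, ct, body ++ [ln])

def parse_content_to_slides_py (content : String) (title : String) : List (List (String × String)) :=
  let lines := (PySem.Str.splitlines content).map PySem.Str.rstrip
  let ct0 := if title = "" then "演示文稿" else title
  let r := lines.foldl pvStepA ([], ct0, [])
  let slides := if r.2.2 ≠ [] then r.1 ++ [pvMkSlide r.2.1 r.2.2] else r.1
  if slides = [] then [pvDefaultSlide title] else slides

-- ===== PORT B =====
-- the two-pointer run scan: maximal runs of lines with equal heading-ness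
def pvRuns : List String → List (Bool × List String)
  | [] => []
  | l :: ls =>
    let k := pvIsHead l
    (k, l :: ls.takeWhile (fun x => pvIsHead x == k)) ::
      pvRuns (ls.dropWhile (fun x => pvIsHead x == k))
termination_by lines => lines.length
decreasing_by
  simp only [List.length_cons]
  exact Nat.lt_succ_of_le (List.length_dropWhile_le _ _)

def pvStepB (st : List (List (String × String)) × String) (r : Bool × List String) :
    List (List (String × String)) × String :=
  if r.1 then (st.1, r.2.foldl pvTitleStep st.2)
  else (st.1 ++ [pvMkSlide st.2 r.2], st.2)

def parse_content_to_slides_py_alt (content : String) (title : String) : List (List (String × String)) :=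
  let lines := (PySem.Str.splitlines content).map PySem.Str.rstrip
  let ct0 := if title = "" then "演示文稿" else title
  let slides := ((pvRuns lines).foldl pvStepB ([], ct0)).1
  if slides = [] then [pvDefaultSlide title] else slides

-- ===== PRECONDITION & SPEC =====
def Spec_parse_content_to_slides_py (content : String) (title : String) (out : List (List (String × String))) : Prop := out = parse_content_to_slides_py_alt content title
instance (content : String) (title : String) (out : List (List (String × String))) : Decidable (Spec_parse_content_to_slides_py content title out) := by unfold Spec_parse_content_to_slides_py; infer_instance

-- ===== CLAIM (what is proved, stated in full; the proofs are below) =====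
def Claim_equal_parse_content_to_slides_py : Prop := ∀ (content : String) (title : String), Dom_parse_content_to_slides_py content title → Spec_parse_content_to_slides_py content title (parse_content_to_slides_py content title)

-- ===== LEMMAS AND PROOFS =====

lemma pvFoldA_heads (run : List String) (h : ∀ x ∈ run, pvIsHead x = true)
    (slides : List (List (String × String))) (ct : String) :
    run.foldl pvStepA (slides, ct, []) = (slides, run.foldl pvTitleStep ct, []) := by
  induction run generalizing ct with
  | nil => rfl
  | cons l t ih =>
    simp only [List.foldl_cons, pvStepA, h l (List.mem_cons_self), if_pos, ne_eq,
      not_true_eq_false]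
    simpa using ih (fun x hx => h x (List.mem_cons_of_mem _ hx)) (pvTitleStep ct l)

lemma pvFoldA_bodies (run : List String) (h : ∀ x ∈ run, pvIsHead x = false)
    (slides : List (List (String × String))) (ct : String) (b : List String) :
    run.foldl pvStepA (slides, ct, b) = (slides, ct, b ++ run) := by
  induction run generalizing b with
  | nil => simp
  | cons l t ih =>
    have hl : pvIsHead l = false := h l (List.mem_cons_self)
    simp only [List.foldl_cons, pvStepA, hl]
    simpa using ih (fun x hx => h x (List.mem_cons_of_mem _ hx)) (b ++ [l])

lemma pvDropWhile_head_false {α : Type} (p : α → Bool) (l : List α) {d : α} {dt : List α}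
    (h : l.dropWhile p = d :: dt) : p d = false := by
  induction l with
  | nil => simp at h
  | cons a t ih =>
    cases pa : p a
    · rw [List.dropWhile_cons_of_neg (by simp [pa])] at h
      injection h with h1 h2
      rw [← h1]; exact pa
    · rw [List.dropWhile_cons_of_pos pa] at h; exact ih h

lemma pvMain (lines : List String) (slides : List (List (String × String))) (ct : String) :
    (let r := lines.foldl pvStepA (slides, ct, []);
     if r.2.2 ≠ [] then r.1 ++ [pvMkSlide r.2.1 r.2.2] else r.1)
    = ((pvRuns lines).foldl pvStepB (slides, ct)).1 := by
  induction lines using pvRuns.induct generalizing slides ct with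
  | case1 => simp [pvRuns]
  | case2 l ls _k ih =>
    have hsplit : ls.takeWhile (fun x => pvIsHead x == pvIsHead l) ++
        ls.dropWhile (fun x => pvIsHead x == pvIsHead l) = ls :=
      List.takeWhile_append_dropWhile
    set tw := ls.takeWhile (fun x => pvIsHead x == pvIsHead l) with htw
    set dw := ls.dropWhile (fun x => pvIsHead x == pvIsHead l) with hdw
    have htwmem : ∀ x ∈ tw, pvIsHead x = pvIsHead l := by
      intro x hx
      have := List.mem_takeWhile_imp (htw ▸ hx)
      simpa using this
    have hfold : (l :: ls).foldl pvStepA (slides, ct, ([] : List String))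
        = dw.foldl pvStepA ((l :: tw).foldl pvStepA (slides, ct, [])) := by
      rw [show l :: ls = (l :: tw) ++ dw by simp [hsplit], List.foldl_append]
    have hruns : pvRuns (l :: ls) = (pvIsHead l, l :: tw) :: pvRuns dw := by
      rw [pvRuns]
    cases hk : pvIsHead l with
    | true =>
      have hheads : ∀ x ∈ l :: tw, pvIsHead x = true := by
        intro x hx
        rcases List.mem_cons.1 hx with h | h
        · subst h; exact hk
        · rw [htwmem x h, hk]
      have hstep : ((pvIsHead l, l :: tw) :: pvRuns dw).foldl pvStepB (slides, ct)
          = (pvRuns dw).foldl pvStepB (slides, (l :: tw).foldl pvTitleStep ct) := by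
        rw [List.foldl_cons]
        simp [pvStepB, hk]
      rw [hfold, pvFoldA_heads _ hheads, hruns, hstep]
      exact ih slides ((l :: tw).foldl pvTitleStep ct)
    | false =>
      have hbodies : ∀ x ∈ l :: tw, pvIsHead x = false := by
        intro x hx
        rcases List.mem_cons.1 hx with h | h
        · subst h; exact hk
        · rw [htwmem x h, hk]
      have hstep : ((pvIsHead l, l :: tw) :: pvRuns dw).foldl pvStepB (slides, ct)
          = (pvRuns dw).foldl pvStepB (slides ++ [pvMkSlide ct (l :: tw)], ct) := by
        rw [List.foldl_cons]
        simp [pvStepB, hk]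
      rw [hfold, pvFoldA_bodies _ hbodies, hruns, hstep]
      cases hdwc : dw with
      | nil => simp [pvRuns, pvMkSlide]
      | cons d dt =>
        have hpd : (pvIsHead d == pvIsHead l) = false :=
          pvDropWhile_head_false _ ls (hdw ▸ hdwc)
        have hd : pvIsHead d = true := by
          rw [hk] at hpd
          cases h' : pvIsHead d
          · rw [h'] at hpd; simp at hpd
          · rfl
        have hshift : (d :: dt).foldl pvStepA (slides, ct, ([] : List String) ++ (l :: tw))
            = (d :: dt).foldl pvStepA (slides ++ [pvMkSlide ct (l :: tw)], ct, []) := by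
          simp only [List.foldl_cons]
          have h1 : pvStepA (slides, ct, ([] : List String) ++ (l :: tw)) d
              = (slides ++ [pvMkSlide ct (l :: tw)], pvTitleStep ct d, []) := by
            simp [pvStepA, hd]
          have h2 : pvStepA (slides ++ [pvMkSlide ct (l :: tw)], ct, ([] : List String)) d
              = (slides ++ [pvMkSlide ct (l :: tw)], pvTitleStep ct d, []) := by
            simp [pvStepA, hd]
          rw [h1, h2]
        rw [hdwc] at ih
        rw [hshift]
        exact ih (slides ++ [pvMkSlide ct (l :: tw)]) ct

-- ===== VERDICT (by name: the statement is the Claim_ definition above) =====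
theorem parse_content_to_slides_py_spec : Claim_equal_parse_content_to_slides_py := by
  intro content title _
  unfold Spec_parse_content_to_slides_py parse_content_to_slides_py parse_content_to_slides_py_alt
  simp only []
  rw [← pvMain]
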